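-- pv_equiv track=rewrite | github.com/omarelsewify/Projects | CS106A Programming Methodology/section5/string_parsing.py | parse_liked
-- ===== SOURCE A (Python) =====
-- def parse_liked(s, liked):
--     """
--     >>> parse_liked('xxabad..A..BB', ['a', 'b', 'c'])
--     ['aba', 'BB']
--     >>> parse_liked('^^AB.BBD.CD.', ['a', 'b', 'c'])
--     ['AB', 'BB']
--     """
--     search = 0
--     result = []
--     while search < len(s):
--         low = s.lower()
--         word = ''
--         while search < len(s) and low[search] in liked:
--             word += s[search]
--             search += 1
--         if len(word) > 1:
--             result.append(word)
--         search += 1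
--     return result
-- ===== SOURCE B (Python) =====
-- def parse_liked(s, liked):
--     """Boundary-detection algorithm: compute the boolean liked-mask of s
--     (via s.lower()), find run-start and run-end positions as the places
--     where the padded mask flips, pair them with zip, and slice s for
--     each interval longer than 1."""
--     low = s.lower()
--     n = len(s)
--     mask = [c in liked for c in low]
--     padded = [False] + mask + [False]
--     starts = [i for i in range(n) if mask[i] and not padded[i]]
--     ends = [i + 1 for i in range(n) if mask[i] and not padded[i + 2]]
--     return [s[a:b] for a, b in zip(starts, ends) if b - a > 1]
-- ===== Notes on version B (the rewrite author's own statement) =====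
-- stated objective: alternative
-- what changed: Replaced A's nested index-walking while-loops by a boundary-detection algorithm: build the boolean liked-mask once, find run starts and run ends as flips of the padded mask in two independent comprehensions, zip them into intervals and slice s for each interval of length > 1.
import Mathlib
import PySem

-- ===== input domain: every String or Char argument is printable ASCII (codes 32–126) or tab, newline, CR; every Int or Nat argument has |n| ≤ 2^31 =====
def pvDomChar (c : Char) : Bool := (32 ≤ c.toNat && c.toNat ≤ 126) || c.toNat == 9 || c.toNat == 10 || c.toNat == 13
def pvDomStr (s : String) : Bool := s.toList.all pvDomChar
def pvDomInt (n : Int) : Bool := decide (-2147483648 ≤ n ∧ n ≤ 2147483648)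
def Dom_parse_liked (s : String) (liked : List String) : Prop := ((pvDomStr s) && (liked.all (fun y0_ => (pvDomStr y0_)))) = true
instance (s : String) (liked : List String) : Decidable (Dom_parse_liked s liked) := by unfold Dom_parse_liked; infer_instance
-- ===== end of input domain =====

-- B replaces A's nested index-walking scan by a boundary-detection algorithm:
-- a boolean liked-mask, run starts/ends read off the padded mask as flips,
-- zipped into intervals and sliced (an alternative of similar cost).

-- ===== PORT A =====
-- inner while: 'while search < len(s) and low[search] in liked: word += s[search]; search += 1'
def parse_liked_inner (sL lowL : List Char) (liked : List String)
    (search : Nat) (word : List Char) : Nat × List Char :=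
  if h : search < sL.length ∧ liked.contains (String.ofList [lowL.getD search ' ']) then
    parse_liked_inner sL lowL liked (search + 1) (word ++ [sL.getD search ' '])
  else (search, word)
termination_by sL.length - search
decreasing_by omega

-- the inner while never moves 'search' backwards (needed for the outer loop's termination)
theorem parse_liked_inner_ge (sL lowL : List Char) (liked : List String)
    (search : Nat) (word : List Char) :
    search ≤ (parse_liked_inner sL lowL liked search word).1 := by
  fun_induction parse_liked_inner sL lowL liked search word with
  | case1 search word h ih => omega
  | case2 search word h => simp

-- outer while: recompute low = s.lower(), run the inner while, append word if len > 1, search += 1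
def parse_liked_outer (s : String) (liked : List String)
    (search : Nat) (result : List String) : List String :=
  if h : search < s.toList.length then
    let lowL := (PySem.Str.lower s).toList
    let p := parse_liked_inner s.toList lowL liked search []
    let result' := if p.2.length > 1 then result ++ [String.ofList p.2] else result
    parse_liked_outer s liked (p.1 + 1) result'
  else result
termination_by s.toList.length - search
decreasing_by
  have := parse_liked_inner_ge s.toList ((PySem.Str.lower s).toList) liked search []
  omega

def parse_liked (s : String) (liked : List String) : List String :=
  parse_liked_outer s liked 0 []

-- ===== PORT B =====
-- low = s.lower(); mask = [c in liked for c in low]; padded = [False]+mask+[False];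
-- starts/ends are the mask flips; return [s[a:b] for a,b in zip(starts,ends) if b-a>1].
-- (list indexing mask[i]/padded[i] is via getD: every index used is in range, so this is exact)
def parse_liked_alt (s : String) (liked : List String) : List String :=
  let low := PySem.Str.lower s
  let n : Int := PySem.Str.len s
  let mask := low.toList.map (fun c => liked.contains (String.ofList [c]))
  let padded := [false] ++ mask ++ [false]
  let starts := (PySem.List.pyRange 0 n 1).filter
    (fun i => mask.getD i.toNat false && !(padded.getD i.toNat false))
  let ends := ((PySem.List.pyRange 0 n 1).filter
    (fun i => mask.getD i.toNat false && !(padded.getD (i.toNat + 2) false))).map (· + 1)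
  ((starts.zip ends).filter (fun p => decide (p.2 - p.1 > 1))).map
    (fun p => String.ofList (PySem.List.slice s.toList (some p.1) (some p.2)))

-- ===== PRECONDITION & SPEC =====
def Spec_parse_liked (s : String) (liked : List String) (out : List String) : Prop := out = parse_liked_alt s liked
instance (s : String) (liked : List String) (out : List String) : Decidable (Spec_parse_liked s liked out) := by unfold Spec_parse_liked; infer_instance

-- ===== CLAIM (what is proved, stated in full; the proofs are below) =====
def Claim_equal_parse_liked : Prop := ∀ (s : String) (liked : List String), Dom_parse_liked s liked → Spec_parse_liked s liked (parse_liked s liked)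

-- ===== LEMMAS AND PROOFS =====

-- the common run predicate: does the lowered character belong to 'liked'?
def pvKey (liked : List String) (c : Char) : Bool :=
  liked.contains (String.ofList [PySem.Chars.lowerChar c])

-- the list of maximal runs of pvKey-characters (empty runs included)
def pvRuns (liked : List String) : List Char → List Char → List String
  | [], cur => [String.ofList cur]
  | c :: r, cur =>
    if pvKey liked c then pvRuns liked r (cur ++ [c])
    else String.ofList cur :: pvRuns liked r []

-- run starts of a boolean mask, with the previous bit and the absolute position
def pvStartsF : List Bool → Bool → Nat → List Nat
  | [], _, _ => []
  | b :: r, prev, i => (if b && !prev then [i] else []) ++ pvStartsF r b (i + 1)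

-- run ends (exclusive) of a boolean mask, with the absolute position
def pvEndsF : List Bool → Nat → List Nat
  | [], _ => []
  | b :: r, i => (if b && !(r.headD false) then [i + 1] else []) ++ pvEndsF r (i + 1)

theorem filter_pvRuns (liked : List String) (cs cur : List Char) :
    (pvRuns liked cs cur).filter (fun w => w.toList.length > 1) =
      (if (cur ++ cs.takeWhile (pvKey liked)).length > 1
        then [String.ofList (cur ++ cs.takeWhile (pvKey liked))] else [])
      ++ (pvRuns liked (cs.drop ((cs.takeWhile (pvKey liked)).length + 1)) []).filter
           (fun w => w.toList.length > 1) := by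
  induction cs generalizing cur with
  | nil => simp [pvRuns, List.filter_cons]
  | cons c r ih =>
    by_cases h : pvKey liked c = true
    · simp only [pvRuns, h, if_pos, List.takeWhile_cons_of_pos, List.length_cons, List.drop_succ_cons]
      rw [ih (cur ++ [c])]
      simp [List.append_assoc]
    · simp only [Bool.not_eq_true] at h
      simp only [pvRuns, h, Bool.false_eq_true, not_false_iff, if_neg,
        List.takeWhile_cons_of_neg, List.length_nil, Nat.zero_add, List.drop_succ_cons,
        List.drop_zero, List.append_nil, List.filter_cons, String.toList_ofList]
      split <;> simp_all

theorem inner_spec (sL : List Char) (liked : List String) (search : Nat) (word : List Char) :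
    parse_liked_inner sL (sL.map PySem.Chars.lowerChar) liked search word =
      (search + ((sL.drop search).takeWhile (pvKey liked)).length,
       word ++ (sL.drop search).takeWhile (pvKey liked)) := by
  fun_induction parse_liked_inner sL (sL.map PySem.Chars.lowerChar) liked search word with
  | case1 search word h ih =>
    obtain ⟨hs, hc⟩ := h
    have hs' : search < sL.length := hs
    have hgd : (sL.map PySem.Chars.lowerChar).getD search ' ' = PySem.Chars.lowerChar sL[search] := by
      rw [List.getD_eq_getElem _ _ (by simpa using hs')]
      simp
    have hkey : pvKey liked sL[search] = true := by
      unfold pvKey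
      rw [hgd] at hc
      exact hc
    rw [List.drop_eq_getElem_cons hs', List.takeWhile_cons_of_pos hkey, ih]
    rw [List.getD_eq_getElem _ _ hs']
    refine Prod.ext ?_ ?_
    · simp only [List.length_cons]
      omega
    · simp
  | case2 search word h =>
    by_cases hs : search < sL.length
    · have hc : pvKey liked sL[search] = false := by
        rcases Bool.eq_false_or_eq_true (pvKey liked sL[search]) with hp | hp
        swap
        · exact hp
        · exfalso
          apply h
          refine ⟨hs, ?_⟩
          have hgd : (sL.map PySem.Chars.lowerChar).getD search ' ' = PySem.Chars.lowerChar sL[search] := by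
            rw [List.getD_eq_getElem _ _ (by simpa using hs)]
            simp
          rw [hgd]
          unfold pvKey at hp
          exact hp
      rw [List.drop_eq_getElem_cons hs, List.takeWhile_cons_of_neg (by simp [hc])]
      simp
    · rw [List.drop_eq_nil_of_le (by omega)]
      simp

theorem outer_spec (s : String) (liked : List String) (search : Nat) (result : List String) :
    parse_liked_outer s liked search result =
      result ++ (pvRuns liked (s.toList.drop search) []).filter (fun w => w.toList.length > 1) := by
  fun_induction parse_liked_outer s liked search result with
  | case1 search result h lowL p result' ih =>
    have hlow : lowL = s.toList.map PySem.Chars.lowerChar := by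
      show (PySem.Str.lower s).toList = _
      simp [PySem.Str.toList_lower, PySem.Chars.lower]
    have hp : p = (search + ((s.toList.drop search).takeWhile (pvKey liked)).length,
        (s.toList.drop search).takeWhile (pvKey liked)) := by
      show parse_liked_inner s.toList lowL liked search [] = _
      rw [hlow, inner_spec]
      simp
    have hres : result' = if ((s.toList.drop search).takeWhile (pvKey liked)).length > 1
        then result ++ [String.ofList ((s.toList.drop search).takeWhile (pvKey liked))]
        else result := by
      show (if p.2.length > 1 then result ++ [String.ofList p.2] else result) = _
      rw [hp]
    rw [ih, hres, hp]
    rw [filter_pvRuns liked (s.toList.drop search) []]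
    have hd : List.drop ((search + ((s.toList.drop search).takeWhile (pvKey liked)).length) + 1) s.toList
        = (s.toList.drop search).drop (((s.toList.drop search).takeWhile (pvKey liked)).length + 1) := by
      rw [List.drop_drop]
      congr 1
    rw [hd]
    simp only [List.nil_append]
    split_ifs <;> simp [List.append_assoc]
  | case2 search result h =>
    rw [List.drop_eq_nil_of_le (by omega)]
    simp [pvRuns]

-- padded-mask reads: padded[j+1] is mask[j] (out-of-range reads give false on both sides)
theorem padded_getD (mask : List Bool) (j : Nat) :
    (([false] ++ mask ++ [false]).getD (j + 1) false) = mask.getD j false := by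
  simp only [List.getD_eq_getElem?_getD, List.singleton_append, List.getElem?_cons_succ,
    List.getElem?_append]
  by_cases h : j < mask.length
  · simp [h]
  · rw [List.getElem?_eq_none (by omega)]
    by_cases h2 : j = mask.length
    · subst h2
      simp
    · rw [List.getElem?_eq_none (by simp; omega)]
      split <;> rfl

-- the starts comprehension is pvStartsF
theorem starts_eq (mask : List Bool) (m j : Nat) (h : j + m = mask.length) :
    (List.range' j m).filter
        (fun i => mask.getD i false && !(([false] ++ mask ++ [false]).getD i false))
      = pvStartsF (mask.drop j) (([false] ++ mask ++ [false]).getD j false) j := by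
  induction m generalizing j with
  | zero =>
    rw [List.drop_eq_nil_of_le (by omega)]
    simp [pvStartsF]
  | succ m ih =>
    have hj : j < mask.length := by omega
    rw [List.range'_succ, List.filter_cons, List.drop_eq_getElem_cons hj]
    simp only [pvStartsF]
    rw [show mask[j] = mask.getD j false from (List.getD_eq_getElem _ _ hj).symm]
    rw [show mask.getD j false = ([false] ++ mask ++ [false]).getD (j + 1) false from
      (padded_getD mask j).symm]
    rw [← ih (j + 1) (by omega)]
    split <;> simp_all

-- the ends comprehension is pvEndsF
theorem ends_eq (mask : List Bool) (m j : Nat) (h : j + m = mask.length) :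
    ((List.range' j m).filter
        (fun i => mask.getD i false && !(([false] ++ mask ++ [false]).getD (i + 2) false))).map (· + 1)
      = pvEndsF (mask.drop j) j := by
  induction m generalizing j with
  | zero =>
    rw [List.drop_eq_nil_of_le (by omega)]
    simp [pvEndsF]
  | succ m ih =>
    have hj : j < mask.length := by
      omega
    have hhead : (mask.drop (j + 1)).headD false = mask.getD (j + 1) false := by
      rw [List.headD_eq_head?_getD, List.head?_drop, List.getD_eq_getElem?_getD]
    rw [List.range'_succ, List.filter_cons, List.drop_eq_getElem_cons hj]
    simp only [pvEndsF, hhead]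
    have h2 : (([false] ++ mask ++ [false]).getD (j + 2) false) = mask.getD (j + 1) false :=
      padded_getD mask (j + 1)
    rw [show mask[j] = mask.getD j false from (List.getD_eq_getElem _ _ hj).symm]
    rw [h2, ← ih (j + 1) (by omega)]
    split <;> simp_all

-- pvStartsF across a prefix of true bits
theorem pvStartsF_true_prefix (t rest : List Bool) (prev : Bool) (i : Nat)
    (ht : ∀ b ∈ t, b = true) :
    pvStartsF (t ++ rest) prev i =
      (if t = [] then pvStartsF rest prev i
       else (if prev then [] else [i]) ++ pvStartsF rest true (i + t.length)) := by
  induction t generalizing prev i with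
  | nil => simp
  | cons b t' ih =>
    have hb : b = true := ht b (by simp)
    subst hb
    simp only [List.cons_append, pvStartsF, reduceIte, List.length_cons]
    rw [ih _ _ (fun x hx => ht x (by simp [hx]))]
    by_cases h : t' = []
    · subst h
      simp only [reduceIte, pvStartsF]
      cases prev <;> simp
    · have hn : i + 1 + t'.length = i + (t'.length + 1) := by omega
      cases prev <;> simp [h, hn]

-- pvEndsF across a prefix of true bits
theorem pvEndsF_true_prefix (t rest : List Bool) (i : Nat)
    (ht : ∀ b ∈ t, b = true) :
    pvEndsF (t ++ rest) i =
      (if t = [] then pvEndsF rest i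
       else (if rest.headD false then [] else [i + t.length]) ++ pvEndsF rest (i + t.length)) := by
  induction t generalizing i with
  | nil => simp
  | cons b t' ih =>
    have hb : b = true := ht b (by simp)
    subst hb
    simp only [List.cons_append, pvEndsF, List.length_cons]
    rw [ih _ (fun x hx => ht x (by simp [hx]))]
    by_cases h : t' = []
    · subst h
      simp only [List.nil_append, reduceIte, List.headD_eq_head?_getD]
      rcases Bool.eq_false_or_eq_true (rest.head?.getD false) with hr | hr <;> simp [hr]
    · cases t' with
      | nil => exact absurd rfl h
      | cons x xs =>
        have hx : x = true := ht x (by simp)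
        subst hx
        have hn : i + 1 + (xs.length + 1) = i + (xs.length + 1 + 1) := by omega
        simp [hn]

-- one whole run step for pvStartsF / pvEndsF: with t a nonempty all-true prefix and the
-- rest starting with false (or empty), the run contributes the single interval [j, j+|t|)
theorem pvStartsF_run (t rest : List Bool) (j : Nat)
    (ht : ∀ b ∈ t, b = true) (htne : t ≠ []) (hr : rest.headD false = false) :
    pvStartsF (t ++ rest) false j = j :: pvStartsF rest.tail false (j + t.length + 1) := by
  rw [pvStartsF_true_prefix _ _ _ _ ht]
  simp only [htne, if_neg, reduceIte, List.singleton_append]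
  cases rest with
  | nil => simp [pvStartsF]
  | cons b r =>
    simp only [List.headD_cons] at hr
    subst hr
    have hn : j + t.length + 1 = j + (t.length + 1) := by omega
    simp [pvStartsF, hn]

theorem pvEndsF_run (t rest : List Bool) (j : Nat)
    (ht : ∀ b ∈ t, b = true) (htne : t ≠ []) (hr : rest.headD false = false) :
    pvEndsF (t ++ rest) j = (j + t.length) :: pvEndsF rest.tail (j + t.length + 1) := by
  rw [pvEndsF_true_prefix _ _ _ ht]
  simp only [htne, if_neg, hr, Bool.false_eq_true, reduceIte, List.singleton_append]
  cases rest with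
  | nil => simp [pvEndsF]
  | cons b r =>
    simp only [List.headD_cons] at hr
    subst hr
    have hn : j + t.length + 1 = j + (t.length + 1) := by omega
    simp [pvEndsF, hn]

-- the zipped, filtered, sliced intervals are exactly the long runs
theorem zip_runs (liked : List String) (full cs : List Char) (j : Nat)
    (h : full.drop j = cs) :
    (((pvStartsF (cs.map (pvKey liked)) false j).zip (pvEndsF (cs.map (pvKey liked)) j)).filter
        (fun p => decide (p.1 + 1 < p.2))).map
        (fun p => String.ofList ((full.drop p.1).take (p.2 - p.1)))
      = (pvRuns liked cs []).filter (fun w => w.toList.length > 1) := by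
  cases cs with
  | nil => simp [pvRuns, pvStartsF, pvEndsF, List.filter_cons]
  | cons c r0 =>
    by_cases hk : pvKey liked c = true
    · -- a run starts here: step over the whole maximal run at once
      have htne : ((c :: r0).takeWhile (pvKey liked)).map (pvKey liked) ≠ [] := by
        simp [List.takeWhile_cons_of_pos hk]
      have hL1 : 1 ≤ ((c :: r0).takeWhile (pvKey liked)).length := by
        rw [List.takeWhile_cons_of_pos hk]
        simp
      have hsplit : c :: r0
          = (c :: r0).takeWhile (pvKey liked) ++ (c :: r0).dropWhile (pvKey liked) :=
        (List.takeWhile_append_dropWhile).symm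
      have htall : ∀ b ∈ ((c :: r0).takeWhile (pvKey liked)).map (pvKey liked), b = true := by
        intro b hb
        obtain ⟨x, hx, hbx⟩ := List.mem_map.mp hb
        rw [← hbx]
        exact List.mem_takeWhile_imp hx
      have hhead : (((c :: r0).dropWhile (pvKey liked)).map (pvKey liked)).headD false = false := by
        cases hq : (c :: r0).dropWhile (pvKey liked) with
        | nil => simp
        | cons f r =>
          have hne : (c :: r0).dropWhile (pvKey liked) ≠ [] := by simp [hq]
          have := List.head_dropWhile_not (pvKey liked) hne
          simp only [hq, List.head_cons] at this
          simp [this]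
      have hmap : (c :: r0).map (pvKey liked)
          = ((c :: r0).takeWhile (pvKey liked)).map (pvKey liked)
            ++ ((c :: r0).dropWhile (pvKey liked)).map (pvKey liked) := by
        conv_lhs => rw [hsplit]
        rw [List.map_append]
      have hS : pvStartsF ((c :: r0).map (pvKey liked)) false j
          = j :: pvStartsF ((((c :: r0).dropWhile (pvKey liked)).tail).map (pvKey liked)) false
              (j + ((c :: r0).takeWhile (pvKey liked)).length + 1) := by
        rw [hmap, pvStartsF_run _ _ _ htall htne hhead, List.map_tail]
        simp
      have hE : pvEndsF ((c :: r0).map (pvKey liked)) j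
          = (j + ((c :: r0).takeWhile (pvKey liked)).length)
              :: pvEndsF ((((c :: r0).dropWhile (pvKey liked)).tail).map (pvKey liked))
              (j + ((c :: r0).takeWhile (pvKey liked)).length + 1) := by
        rw [hmap, pvEndsF_run _ _ _ htall htne hhead, List.map_tail]
        simp
      have hdropfull : full.drop (j + ((c :: r0).takeWhile (pvKey liked)).length + 1)
          = ((c :: r0).dropWhile (pvKey liked)).tail := by
        have h1 : full.drop (j + ((c :: r0).takeWhile (pvKey liked)).length + 1)
            = (full.drop j).drop (((c :: r0).takeWhile (pvKey liked)).length + 1) := by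
          rw [List.drop_drop]
          congr 1 <;> omega
        rw [h1, h]
        have h2 := List.drop_length_add_append (l₁ := (c :: r0).takeWhile (pvKey liked))
          (l₂ := (c :: r0).dropWhile (pvKey liked)) 1
        rw [List.takeWhile_append_dropWhile] at h2
        rw [h2, List.drop_one]
      have htake : (full.drop j).take ((c :: r0).takeWhile (pvKey liked)).length
          = (c :: r0).takeWhile (pvKey liked) := by
        have h2 := List.take_left (l₁ := (c :: r0).takeWhile (pvKey liked))
          (l₂ := (c :: r0).dropWhile (pvKey liked))
        rw [List.takeWhile_append_dropWhile] at h2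
        rw [h, h2]
      have hrec := zip_runs liked full (((c :: r0).dropWhile (pvKey liked)).tail)
        (j + ((c :: r0).takeWhile (pvKey liked)).length + 1) hdropfull
      rw [hS, hE, List.zip_cons_cons, List.filter_cons]
      rw [filter_pvRuns liked (c :: r0) []]
      have hdrop2 : (c :: r0).drop (((c :: r0).takeWhile (pvKey liked)).length + 1)
          = ((c :: r0).dropWhile (pvKey liked)).tail := by
        have h2 := List.drop_length_add_append (l₁ := (c :: r0).takeWhile (pvKey liked))
          (l₂ := (c :: r0).dropWhile (pvKey liked)) 1
        rw [List.takeWhile_append_dropWhile] at h2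
        rw [h2, List.drop_one]
      rw [hdrop2]
      simp only [List.nil_append]
      by_cases hlen : 1 < ((c :: r0).takeWhile (pvKey liked)).length
      · have hcond : decide ((j, j + ((c :: r0).takeWhile (pvKey liked)).length).1 + 1
            < (j, j + ((c :: r0).takeWhile (pvKey liked)).length).2) = true := by
          simp only [decide_eq_true_eq]
          omega
        rw [hcond]
        simp only [if_true, List.map_cons, hrec]
        have harith : j + ((c :: r0).takeWhile (pvKey liked)).length - j
            = ((c :: r0).takeWhile (pvKey liked)).length := by omega
        rw [harith, htake, if_pos hlen]
        simp
      · have hcond : decide ((j, j + ((c :: r0).takeWhile (pvKey liked)).length).1 + 1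
            < (j, j + ((c :: r0).takeWhile (pvKey liked)).length).2) = false := by
          simp only [decide_eq_false_iff_not]
          omega
        rw [hcond]
        simp only [Bool.false_eq_true, if_false, hrec]
        rw [if_neg hlen]
        simp
    · -- non-liked head: step over the single separator character
      have hk' : pvKey liked c = false := by
        cases hq : pvKey liked c with
        | false => rfl
        | true => exact absurd hq hk
      have hmap : (c :: r0).map (pvKey liked) = false :: r0.map (pvKey liked) := by
        simp [hk']
      have h' : full.drop (j + 1) = r0 := by
        rw [← List.drop_drop, h, List.drop_one, List.tail_cons]
      have hrec := zip_runs liked full r0 (j + 1) h'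
      rw [hmap]
      simp only [pvStartsF, pvEndsF, Bool.false_and, Bool.false_eq_true, if_false,
        List.nil_append, List.headD_nil]
      rw [hrec]
      simp [pvRuns, hk', List.filter_cons]
termination_by cs.length
decreasing_by
  · have h2 := List.length_dropWhile_le (pvKey liked) (c :: r0)
    have h3 : ((c :: r0).dropWhile (pvKey liked)).tail.length
        = ((c :: r0).dropWhile (pvKey liked)).length - 1 := List.length_tail
    subst cs
    rw [h]
    simp only [List.length_cons] at h2 h3 ⊢
    omega
  · subst cs
    rw [h]
    simp only [List.length_cons]
    omega

-- ===== VERDICT (by name: the statement is the Claim_ definition above) =====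
theorem parse_liked_spec : Claim_equal_parse_liked := by
  intro s liked _
  unfold Spec_parse_liked parse_liked parse_liked_alt
  rw [outer_spec]
  simp only [List.nil_append, List.drop_zero]
  have hmask : (PySem.Str.lower s).toList.map (fun c => liked.contains (String.ofList [c]))
      = s.toList.map (pvKey liked) := by
    simp only [PySem.Str.toList_lower, PySem.Chars.lower, List.map_map]
    rfl
  have hlen : PySem.Str.len s = ((s.toList.map (pvKey liked)).length : Int) := by
    simp [pysem]
  rw [hmask, hlen]
  set m := s.toList.map (pvKey liked) with hm
  have hstarts : (PySem.List.pyRange 0 (m.length : Int) 1).filter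
        (fun i => m.getD i.toNat false && !(([false] ++ m ++ [false]).getD i.toNat false))
      = (pvStartsF m false 0).map (fun k : Nat => (k : Int)) := by
    rw [PySem.List.pyRange_zero_natCast, List.filter_map]
    rw [show ((fun i : Int => m.getD i.toNat false
          && !(([false] ++ m ++ [false]).getD i.toNat false)) ∘ (fun k : Nat => (k : Int)))
        = (fun i : Nat => m.getD i false && !(([false] ++ m ++ [false]).getD i false)) from by
      funext i
      simp [Function.comp]]
    rw [List.range_eq_range', starts_eq m m.length 0 (by omega)]
    simp
  have hends : ((PySem.List.pyRange 0 (m.length : Int) 1).filter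
        (fun i => m.getD i.toNat false && !(([false] ++ m ++ [false]).getD (i.toNat + 2) false))).map (· + 1)
      = (pvEndsF m 0).map (fun k : Nat => (k : Int)) := by
    rw [PySem.List.pyRange_zero_natCast, List.filter_map]
    rw [show ((fun i : Int => m.getD i.toNat false
          && !(([false] ++ m ++ [false]).getD (i.toNat + 2) false)) ∘ (fun k : Nat => (k : Int)))
        = (fun i : Nat => m.getD i false && !(([false] ++ m ++ [false]).getD (i + 2) false)) from by
      funext i
      simp [Function.comp]]
    rw [List.map_map]
    rw [show ((fun x : Int => x + 1) ∘ (fun k : Nat => (k : Int)))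
        = ((fun k : Nat => (k : Int)) ∘ (fun k : Nat => k + 1)) from by
      funext k
      simp [Function.comp]]
    rw [← List.map_map]
    rw [List.range_eq_range', ends_eq m m.length 0 (by omega)]
    simp
  rw [hstarts, hends, List.zip_map, List.filter_map, List.map_map]
  rw [show ((fun p : Int × Int => decide (p.2 - p.1 > 1))
        ∘ Prod.map (fun k : Nat => (k : Int)) (fun k : Nat => (k : Int)))
      = (fun p : Nat × Nat => decide (p.1 + 1 < p.2)) from by
    funext p
    simp only [Function.comp, Prod.map]
    rw [decide_eq_decide]
    omega]
  rw [show ((fun p : Int × Int => String.ofList (PySem.List.slice s.toList (some p.1) (some p.2)))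
        ∘ Prod.map (fun k : Nat => (k : Int)) (fun k : Nat => (k : Int)))
      = (fun p : Nat × Nat => String.ofList ((s.toList.drop p.1).take (p.2 - p.1))) from by
    funext p
    simp only [Function.comp, Prod.map]
    rw [PySem.List.slice_natCast]]
  rw [hm]
  exact (zip_runs liked s.toList s.toList 0 (by simp)).symm
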